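-- pv_equiv track=rewrite | github.com/teegaraji/plate-recognition | detect_and_track.py | fix_plate_smart
-- ===== SOURCE A (Python) =====
-- def fix_plate_smart(plate):
--     replacements = {"0": "O", "1": "I", "2": "Z", "5": "S", "6": "G", "8": "B"}
--     fixed = ""
--     for char in plate:
--         if char.isalpha():
--             fixed += char.upper()
--         elif char.isdigit():
--             fixed += char
--         else:
--             fixed += replacements.get(char, char)
--     return fixed
-- ===== SOURCE B (Python) =====
-- def fix_plate_smart(plate):
--     # The replacements dict is dead code (digits hit the isdigit branch first and
--     # no other char is a key), so the function is exactly per-char uppercasing.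
--     return plate.upper()
-- ===== Notes on version B (the rewrite author's own statement) =====
-- stated objective: simpler
-- what changed: Replaced the char-by-char loop with branches and a dead replacements dict by a single plate.upper() call, after proving the dict lookup and the digit branch always return the char unchanged.
import Mathlib
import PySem

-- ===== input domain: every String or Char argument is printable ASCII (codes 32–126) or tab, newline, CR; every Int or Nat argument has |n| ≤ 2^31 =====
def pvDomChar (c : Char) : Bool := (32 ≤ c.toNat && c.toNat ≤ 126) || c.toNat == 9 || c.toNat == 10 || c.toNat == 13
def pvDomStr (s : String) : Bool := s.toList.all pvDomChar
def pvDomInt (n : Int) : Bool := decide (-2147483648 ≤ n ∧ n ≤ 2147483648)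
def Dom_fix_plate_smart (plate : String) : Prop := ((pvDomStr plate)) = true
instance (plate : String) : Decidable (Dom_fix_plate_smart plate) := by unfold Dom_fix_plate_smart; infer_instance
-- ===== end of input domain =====

-- B replaces A's per-character loop (branches + a dead replacements dict) by a single
-- plate.upper() call; they agree because the dict lookup never fires (objective: simpler).

-- ===== PORT A =====
-- the replacements dict literal, built in insertion order
def pvRepl : PySem.Dict Char Char :=
  ((((((PySem.Dict.empty.insert '0' 'O').insert '1' 'I').insert '2' 'Z').insert
      '5' 'S').insert '6' 'G').insert '8' 'B')

def fix_plate_smart (plate : String) : String :=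
  String.ofList <|
    plate.toList.foldl
      (fun fixed char =>
        if PySem.Chars.isalpha char then fixed ++ [PySem.Chars.upperChar char]
        else if PySem.Chars.isdigit char then fixed ++ [char]
        else fixed ++ [pvRepl.getD char char])
      []

-- ===== PORT B =====
def fix_plate_smart_alt (plate : String) : String :=
  PySem.Str.upper plate

-- ===== PRECONDITION & SPEC =====
def Spec_fix_plate_smart (plate : String) (out : String) : Prop := out = fix_plate_smart_alt plate
instance (plate : String) (out : String) : Decidable (Spec_fix_plate_smart plate out) := by unfold Spec_fix_plate_smart; infer_instance

-- ===== CLAIM (what is proved, stated in full; the proofs are below) =====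
def Claim_equal_fix_plate_smart : Prop := ∀ (plate : String), Dom_fix_plate_smart plate → Spec_fix_plate_smart plate (fix_plate_smart plate)

-- ===== LEMMAS AND PROOFS =====

-- each step of A's loop appends exactly the uppercased character
theorem pv_step (c : Char) :
    (if PySem.Chars.isalpha c then PySem.Chars.upperChar c
     else if PySem.Chars.isdigit c then c
     else pvRepl.getD c c) = PySem.Chars.upperChar c := by
  by_cases ha : PySem.Chars.isalpha c
  · simp [ha]
  · have hl : PySem.Chars.islower c = false := by
      simp [PySem.Chars.isalpha] at ha; exact ha.2
    have hup : PySem.Chars.upperChar c = c := by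
      simp [PySem.Chars.upperChar, hl]
    by_cases hd : PySem.Chars.isdigit c
    · simp [ha, hd, hup]
    · have hne : ∀ d : Char, PySem.Chars.isdigit d = true → c ≠ d := by
        intro d h1
        rintro rfl; exact hd h1
      have hg : pvRepl.getD c c = c := by
        simp [pvRepl, PySem.Dict.getD_insert,
          hne '0' (by decide), hne '1' (by decide), hne '2' (by decide),
          hne '5' (by decide), hne '6' (by decide), hne '8' (by decide)]
      simp [ha, hd, hg, hup]

theorem pv_foldl (l : List Char) (acc : List Char) :
    l.foldl
      (fun fixed char =>
        if PySem.Chars.isalpha char then fixed ++ [PySem.Chars.upperChar char]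
        else if PySem.Chars.isdigit char then fixed ++ [char]
        else fixed ++ [pvRepl.getD char char])
      acc = acc ++ l.map PySem.Chars.upperChar := by
  induction l generalizing acc with
  | nil => simp
  | cons c t ih =>
    have h := pv_step c
    simp only [List.foldl_cons, List.map_cons]
    split_ifs with h1 h2
    · rw [ih]; simp
    · rw [if_neg h1, if_pos h2] at h
      rw [ih, ← h]; simp
    · rw [if_neg h1, if_neg h2] at h
      rw [ih, ← h]; simp

-- ===== VERDICT (by name: the statement is the Claim_ definition above) =====
theorem fix_plate_smart_spec : Claim_equal_fix_plate_smart := by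
  intro plate _
  unfold Spec_fix_plate_smart fix_plate_smart fix_plate_smart_alt
  rw [pv_foldl]
  simp [PySem.Str.upper, PySem.Chars.upper]
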